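-- pv_equiv track=rewrite | github.com/kirillbk/yandex-algorithm-training | 1/4/j.py | split_to_words
-- ===== SOURCE A (Python) =====
-- def split_to_words(line):
-- 	buffer = []
-- 	for c in line:
-- 		if c.isalpha() or c.isdigit() or c == '_':
-- 			buffer.append(c)
-- 		else:
-- 			buffer.append(' ')
-- 	return ''.join(buffer).split()
-- ===== SOURCE B (Python) =====
-- def split_to_words(line):
--     words = []
--     cur = []
--     for c in line:
--         if c.isalpha() or c.isdigit() or c == '_':
--             cur.append(c)
--         elif cur:
--             words.append(''.join(cur))
--             cur = []
--     if cur: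
--         words.append(''.join(cur))
--     return words
-- ===== Notes on version B (the rewrite author's own statement) =====
-- stated objective: alternative
-- what changed: B tokenizes in a single pass with a current-word accumulator instead of building a full space-substituted copy of the string and re-scanning it with str.split().
import Mathlib
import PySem

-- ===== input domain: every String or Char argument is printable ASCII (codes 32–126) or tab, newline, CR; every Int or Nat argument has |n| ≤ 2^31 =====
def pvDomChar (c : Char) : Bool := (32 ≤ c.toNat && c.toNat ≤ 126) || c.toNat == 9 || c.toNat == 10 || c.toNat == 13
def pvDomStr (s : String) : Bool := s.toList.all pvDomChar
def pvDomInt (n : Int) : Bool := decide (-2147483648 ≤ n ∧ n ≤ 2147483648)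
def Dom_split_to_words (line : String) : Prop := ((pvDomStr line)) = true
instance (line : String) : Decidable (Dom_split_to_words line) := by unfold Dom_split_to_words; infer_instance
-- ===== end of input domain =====

-- B tokenizes in one pass with a current-word accumulator instead of building a
-- space-substituted copy of the string and re-splitting it (alternative decomposition).


-- the classification predicate both Pythons share: c.isalpha() or c.isdigit() or c == '_'
def pvWordChar (c : Char) : Bool := PySem.Chars.isalpha c || PySem.Chars.isdigit c || (c == '_')

-- ===== PORT A =====
-- buffer accumulates one char per input char (word char kept, anything else ' '),
-- then ''.join(buffer).split()
def split_to_words (line : String) : List String :=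
  let buffer := line.toList.foldl (fun b c => b ++ [if pvWordChar c then c else ' ']) []
  PySem.Str.split₀ (String.ofList buffer)

-- ===== PORT B =====
-- state = (words so far, current word); flush current word on a separator and at the end
def pvAltStep (st : List String × List Char) (c : Char) : List String × List Char :=
  if pvWordChar c then (st.1, st.2 ++ [c])
  else if st.2 ≠ [] then (st.1 ++ [String.ofList st.2], []) else st

def split_to_words_alt (line : String) : List String :=
  let st := line.toList.foldl pvAltStep ([], [])
  if st.2 ≠ [] then st.1 ++ [String.ofList st.2] else st.1

-- ===== PRECONDITION & SPEC =====
def Spec_split_to_words (line : String) (out : List String) : Prop := out = split_to_words_alt line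
instance (line : String) (out : List String) : Decidable (Spec_split_to_words line out) := by unfold Spec_split_to_words; infer_instance

-- ===== CLAIM (what is proved, stated in full; the proofs are below) =====
def Claim_equal_split_to_words : Prop := ∀ (line : String), Dom_split_to_words line → Spec_split_to_words line (split_to_words line)

-- ===== LEMMAS AND PROOFS =====

lemma pv_wordChar_not_space (c : Char) (h : pvWordChar c = true) :
    PySem.Chars.isspace c = false := by
  simp only [pvWordChar, PySem.Chars.isalpha, PySem.Chars.isupper, PySem.Chars.islower,
    PySem.Chars.isdigit, Bool.or_eq_true, Bool.and_eq_true, decide_eq_true_eq, beq_iff_eq,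
    Char.le_def, UInt32.le_iff_toNat_le] at h
  have hv : (65 ≤ c.val.toNat ∧ c.val.toNat ≤ 90) ∨ (97 ≤ c.val.toNat ∧ c.val.toNat ≤ 122) ∨
      (48 ≤ c.val.toNat ∧ c.val.toNat ≤ 57) ∨ c.val.toNat = 95 := by
    rcases h with ((⟨h1,h2⟩|⟨h1,h2⟩)|⟨h1,h2⟩)|rfl
    · exact Or.inl ⟨by simpa using h1, by simpa using h2⟩
    · exact Or.inr (Or.inl ⟨by simpa using h1, by simpa using h2⟩)
    · exact Or.inr (Or.inr (Or.inl ⟨by simpa using h1, by simpa using h2⟩))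
    · exact Or.inr (Or.inr (Or.inr (by decide)))
  simp only [PySem.Chars.isspace, Char.toNat, Bool.or_eq_false_iff, Bool.and_eq_false_iff,
    decide_eq_false_iff_not]
  omega

lemma pv_buffer_eq (l : List Char) (acc : List Char) :
    l.foldl (fun b c => b ++ [if pvWordChar c then c else ' ']) acc
      = acc ++ l.map (fun c => if pvWordChar c then c else ' ') := by
  induction l generalizing acc with
  | nil => simp
  | cons c cs ih => simp [List.foldl_cons, ih, List.append_assoc]

lemma pv_go_eq (cs : List Char) : ∀ (cur : List Char) (acc : List (List Char)),
    List.map String.ofList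
      (PySem.Chars.split₀.go (cs.map (fun c => if pvWordChar c then c else ' ')) cur acc) =
    (let st := cs.foldl pvAltStep ((acc.reverse).map String.ofList, cur.reverse)
     if st.2 ≠ [] then st.1 ++ [String.ofList st.2] else st.1) := by
  induction cs with
  | nil =>
    intro cur acc
    simp only [List.map_nil, List.foldl_nil, PySem.Chars.split₀.go]
    by_cases hc : cur = []
    · subst hc; simp
    · have : cur.isEmpty = false := by simpa [List.isEmpty_iff] using hc
      simp [this, hc, List.reverse_eq_nil_iff]
  | cons c cs ih =>
    intro cur acc
    by_cases hw : pvWordChar c = true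
    · have hs := pv_wordChar_not_space c hw
      simp only [List.map_cons, List.foldl_cons, hw, if_true, PySem.Chars.split₀.go, hs,
        Bool.false_eq_true, if_false]
      rw [ih (c :: cur) acc]
      simp [pvAltStep, hw]
    · have hw' : pvWordChar c = false := by simpa using hw
      have hsp : PySem.Chars.isspace ' ' = true := by decide
      simp only [List.map_cons, hw', Bool.false_eq_true, if_false, List.foldl_cons,
        PySem.Chars.split₀.go, hsp, if_true]
      by_cases hc : cur = []
      · subst hc
        simp only [List.isEmpty_nil, if_true]
        rw [ih [] acc]
        simp [pvAltStep, hw']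
      · have hne : cur.isEmpty = false := by simpa [List.isEmpty_iff] using hc
        simp only [hne, Bool.false_eq_true, if_false]
        rw [ih [] (cur.reverse :: acc)]
        simp [pvAltStep, hw', hc, List.reverse_eq_nil_iff]

-- ===== VERDICT (by name: the statement is the Claim_ definition above) =====
theorem split_to_words_spec : Claim_equal_split_to_words := by
  intro line _
  unfold Spec_split_to_words split_to_words split_to_words_alt
  simp only [pv_buffer_eq, List.nil_append, PySem.Str.split₀]
  have hofl : (String.ofList (line.toList.map fun c => if pvWordChar c then c else ' ')).toList
      = line.toList.map fun c => if pvWordChar c then c else ' ' := by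
    simp
  rw [hofl]
  have := pv_go_eq line.toList [] []
  simpa [PySem.Chars.split₀] using this
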